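-- pv_equiv track=rewrite | github.com/Yupick/simpleIA_proyect | app/llm_client.py | calculate_assistant_usage
-- ===== SOURCE A (Python) =====
-- def calculate_assistant_usage(conversations):
--     """Calcula uso de asistentes."""
--     personal_count = 0
--     commercial_count = 0
--
--     for conv in conversations:
--         if conv.get('assistant_type') == 'personal':
--             personal_count += 1
--         elif conv.get('assistant_type') == 'commercial':
--             commercial_count += 1
--
--     return {
--         "personal": personal_count,
--         "commercial": commercial_count
--     }
-- ===== SOURCE B (Python) =====
-- def calculate_assistant_usage(conversations):
--     """Calcula uso de asistentes."""
--     types = [conv.get('assistant_type') for conv in conversations]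
--     return {
--         "personal": types.count('personal'),
--         "commercial": types.count('commercial')
--     }
-- ===== Notes on version B (the rewrite author's own statement) =====
-- stated objective: idiomatic
-- what changed: Replaced the per-element if/elif counting loop with a map extracting every assistant_type followed by two list.count lookups over that table.
import Mathlib
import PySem

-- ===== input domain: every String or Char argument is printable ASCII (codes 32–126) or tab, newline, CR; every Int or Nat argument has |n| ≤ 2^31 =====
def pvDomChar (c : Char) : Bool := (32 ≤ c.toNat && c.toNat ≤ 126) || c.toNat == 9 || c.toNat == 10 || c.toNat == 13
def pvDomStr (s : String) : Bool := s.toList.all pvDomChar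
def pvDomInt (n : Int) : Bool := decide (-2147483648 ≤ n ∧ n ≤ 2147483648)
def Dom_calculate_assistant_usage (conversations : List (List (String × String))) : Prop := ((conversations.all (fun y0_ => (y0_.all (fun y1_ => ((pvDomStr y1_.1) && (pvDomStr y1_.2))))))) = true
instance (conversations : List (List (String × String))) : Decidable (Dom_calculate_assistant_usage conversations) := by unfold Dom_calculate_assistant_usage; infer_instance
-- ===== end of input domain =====

-- ===== PORT A =====
-- Header: B maps out every conversation's assistant_type once, then counts the two
-- categories with list.count instead of A's per-element if/elif accumulator loop (idiomatic).
def calculate_assistant_usage (conversations : List (List (String × String))) : List (String × Int) :=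
  let counts := conversations.foldl (fun (acc : Int × Int) conv =>
    if (PySem.Dict.mk conv).get? "assistant_type" = some "personal" then (acc.1 + 1, acc.2)
    else if (PySem.Dict.mk conv).get? "assistant_type" = some "commercial" then (acc.1, acc.2 + 1)
    else acc) (0, 0)
  [("personal", counts.1), ("commercial", counts.2)]

-- ===== PORT B =====
def calculate_assistant_usage_alt (conversations : List (List (String × String))) : List (String × Int) :=
  let types := conversations.map (fun conv => (PySem.Dict.mk conv).get? "assistant_type")
  [("personal", (types.count (some "personal") : Int)),
   ("commercial", (types.count (some "commercial") : Int))]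

-- ===== PRECONDITION & SPEC =====
def Spec_calculate_assistant_usage (conversations : List (List (String × String))) (out : List (String × Int)) : Prop := out = calculate_assistant_usage_alt conversations
instance (conversations : List (List (String × String))) (out : List (String × Int)) : Decidable (Spec_calculate_assistant_usage conversations out) := by unfold Spec_calculate_assistant_usage; infer_instance

-- ===== CLAIM (what is proved, stated in full; the proofs are below) =====
def Claim_equal_calculate_assistant_usage : Prop := ∀ (conversations : List (List (String × String))), Dom_calculate_assistant_usage conversations → Spec_calculate_assistant_usage conversations (calculate_assistant_usage conversations)

-- ===== LEMMAS AND PROOFS =====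

-- ===== VERDICT (by name: the statement is the Claim_ definition above) =====
theorem pv_fold_counts (l : List (List (String × String))) (p c : Int) :
    l.foldl (fun (acc : Int × Int) conv =>
      if (PySem.Dict.mk conv).get? "assistant_type" = some "personal" then (acc.1 + 1, acc.2)
      else if (PySem.Dict.mk conv).get? "assistant_type" = some "commercial" then (acc.1, acc.2 + 1)
      else acc) (p, c)
    = (p + ((l.map (fun conv => (PySem.Dict.mk conv).get? "assistant_type")).count (some "personal") : Int),
       c + ((l.map (fun conv => (PySem.Dict.mk conv).get? "assistant_type")).count (some "commercial") : Int)) := by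
  induction l generalizing p c with
  | nil => simp
  | cons hd tl ih =>
      simp only [List.foldl_cons, List.map_cons, List.count_cons, beq_iff_eq]
      split_ifs <;> rw [ih] <;> simp_all <;> ring

theorem calculate_assistant_usage_spec : Claim_equal_calculate_assistant_usage := by
  intro conversations _
  unfold Spec_calculate_assistant_usage calculate_assistant_usage calculate_assistant_usage_alt
  simp only [pv_fold_counts]
  simp
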